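-- pv_equiv track=rewrite | github.com/mkalmousli/proot-static-binaries | build.py | compact_ctx_part
-- ===== SOURCE A (Python) =====
-- CTX_ALIAS = {
--     "host": "host",
--     "deps": "deps",
--     "download": "download",
--     "source": "source",
--     "target": "target",
--     "rootfs": "rootfs",
--     "build": "build",
--     "proot": "proot",
--     "qemu": "qemu",
--     "configure": "configure",
--     "make": "make",
--     "install": "install",
--     "x86_64": "x86_64",
--     "aarch64": "aarch64",
--     "armv7": "armv7",
-- }
--
-- def compact_ctx_part(part: str) -> str:
--     alias = CTX_ALIAS.get(part)
--     if alias: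
--         return alias
--     if "/" in part:
--         chunks = [chunk for chunk in part.split("/") if chunk]
--         return "/".join(compact_ctx_part(chunk) for chunk in chunks)
--     return part if len(part) <= 12 else part[:12]
-- ===== SOURCE B (Python) =====
-- def compact_ctx_part(part: str) -> str:
--     # CTX_ALIAS maps every key to itself, every key is slash-free and at
--     # most 12 chars long, so the alias lookup is a no-op: compacting is
--     # exactly "truncate each nonempty '/'-separated chunk to 12 chars".
--     return "/".join(chunk[:12] for chunk in part.split("/") if chunk)
-- ===== Notes on version B (the rewrite author's own statement) =====
-- stated objective: simpler
-- what changed: A consults the CTX_ALIAS dictionary (on the whole part and recursively per chunk); B removes the dictionary entirely, exploiting that CTX_ALIAS maps every key to itself and every key is slash-free and at most 12 chars, so the lookup is a provable no-op: B is a one-liner that splits on the separator, drops empty chunks, truncates each chunk to 12 chars and rejoins.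
import Mathlib
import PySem

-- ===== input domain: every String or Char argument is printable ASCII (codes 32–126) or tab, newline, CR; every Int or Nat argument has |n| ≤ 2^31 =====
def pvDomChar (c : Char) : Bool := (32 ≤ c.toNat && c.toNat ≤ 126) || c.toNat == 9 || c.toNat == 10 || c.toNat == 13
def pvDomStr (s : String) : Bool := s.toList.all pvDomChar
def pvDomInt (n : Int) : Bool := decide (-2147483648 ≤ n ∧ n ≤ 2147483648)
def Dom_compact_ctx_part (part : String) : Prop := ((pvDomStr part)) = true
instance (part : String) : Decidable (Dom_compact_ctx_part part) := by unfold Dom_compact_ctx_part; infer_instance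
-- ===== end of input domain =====

-- B drops the CTX_ALIAS dictionary entirely: the alias map is the identity on slash-free keys of length ≤ 12, so compacting is exactly "truncate each nonempty '/'-chunk to 12 chars and rejoin" (objective: simpler).


-- ===== PORT A =====
-- CTX_ALIAS (module constant), keys/values as code-point lists
def ctxAlias : PySem.Dict (List Char) (List Char) := PySem.Dict.ofList
  [("host".toList, "host".toList), ("deps".toList, "deps".toList),
   ("download".toList, "download".toList), ("source".toList, "source".toList),
   ("target".toList, "target".toList), ("rootfs".toList, "rootfs".toList),
   ("build".toList, "build".toList), ("proot".toList, "proot".toList),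
   ("qemu".toList, "qemu".toList), ("configure".toList, "configure".toList),
   ("make".toList, "make".toList), ("install".toList, "install".toList),
   ("x86_64".toList, "x86_64".toList), ("aarch64".toList, "aarch64".toList),
   ("armv7".toList, "armv7".toList)]

-- A's body, fuel only to make the recursion structural (fuel = len+1 at the call always suffices)
def compactACore : Nat → List Char → List Char
  | 0, part => part
  | fuel+1, part =>
    let al := ctxAlias.getD part []        -- CTX_ALIAS.get(part); None → [] (falsy either way)
    if al ≠ [] then al                     -- if alias truthy: return it
    else if PySem.Chars.isIn ['/'] part then  -- if "/" in part:
      PySem.Chars.join ['/']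
        (((PySem.Chars.splitOn part ['/']).filter (fun c => !c.isEmpty)).map (compactACore fuel))
    else if part.length ≤ 12 then part else PySem.Chars.slice part none (some 12)

def compact_ctx_part (part : String) : String :=
  String.ofList (compactACore (part.toList.length + 1) part.toList)

-- ===== PORT B =====
-- Source B: return "/".join(chunk[:12] for chunk in part.split("/") if chunk)  — no alias dictionary at all
def compact_ctx_part_alt (part : String) : String :=
  String.ofList (PySem.Chars.join ['/']
    (((PySem.Chars.splitOn part.toList ['/']).filter (fun c => !c.isEmpty)).map
      (fun chunk => PySem.Chars.slice chunk none (some 12))))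

-- ===== PRECONDITION & SPEC =====
def Spec_compact_ctx_part (part : String) (out : String) : Prop := out = compact_ctx_part_alt part
instance (part : String) (out : String) : Decidable (Spec_compact_ctx_part part out) := by unfold Spec_compact_ctx_part; infer_instance

-- ===== CLAIM (what is proved, stated in full; the proofs are below) =====
def Claim_equal_compact_ctx_part : Prop := ∀ (part : String), Dom_compact_ctx_part part → Spec_compact_ctx_part part (compact_ctx_part part)

-- ===== LEMMAS AND PROOFS =====

-- Every CTX_ALIAS entry maps a nonempty, slash-free key of length ≤ 12 to itself.
theorem ctxAlias_getD (cs : List Char) :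
    ctxAlias.getD cs [] = [] ∨
      (ctxAlias.getD cs [] = cs ∧ cs.length ≤ 12 ∧ '/' ∉ cs ∧ cs ≠ []) := by
  unfold PySem.Dict.getD PySem.Dict.get?
  cases hf : List.find? (fun p => p.1 == cs) ctxAlias.items with
  | none => left; rfl
  | some p =>
    right
    have hmem := List.mem_of_find?_eq_some hf
    have heq : p.1 = cs := by simpa using List.find?_some hf
    have hitems : ctxAlias.items =
        [("host".toList, "host".toList), ("deps".toList, "deps".toList),
         ("download".toList, "download".toList), ("source".toList, "source".toList),
         ("target".toList, "target".toList), ("rootfs".toList, "rootfs".toList),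
         ("build".toList, "build".toList), ("proot".toList, "proot".toList),
         ("qemu".toList, "qemu".toList), ("configure".toList, "configure".toList),
         ("make".toList, "make".toList), ("install".toList, "install".toList),
         ("x86_64".toList, "x86_64".toList), ("aarch64".toList, "aarch64".toList),
         ("armv7".toList, "armv7".toList)] := by decide
    rw [hitems] at hmem
    subst heq
    simp only [Option.map_some, Option.getD_some]
    fin_cases hmem <;> refine ⟨by decide, by decide, by decide, by decide⟩

-- pieces produced by splitOn.go on sep ['/'] never contain '/'
theorem go_no_sep : ∀ (fuel : Nat) (l cur : List Char) (acc : List (List Char)),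
    l.length < fuel → (∀ p ∈ acc, '/' ∉ p) → ('/' ∉ cur) →
    ∀ p ∈ PySem.Chars.splitOn.go ['/'] fuel l cur acc, '/' ∉ p := by
  intro fuel
  induction fuel with
  | zero => intro l cur acc h; omega
  | succ n ih =>
    intro l cur acc hlen hacc hcur
    match l with
    | [] =>
      simp only [PySem.Chars.splitOn.go]
      intro p hpm
      rcases List.mem_cons.mp (List.mem_reverse.mp hpm) with h | h
      · subst h; simpa using hcur
      · exact hacc p h
    | c :: rest =>
      by_cases hp : List.isPrefixOf ['/'] (c :: rest) = true
      · simp only [PySem.Chars.splitOn.go, hp, if_pos, List.length_cons, List.drop_succ_cons]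
        exact ih rest [] (cur.reverse :: acc) (by simp at hlen; omega)
          (by intro p hpm
              rcases List.mem_cons.mp hpm with h | h
              · subst h; simpa using hcur
              · exact hacc p h)
          (by simp)
      · have hc : c ≠ '/' := by
          intro h; subst h; simp [List.isPrefixOf] at hp
        simp only [PySem.Chars.splitOn.go, hp, Bool.false_eq_true]
        exact ih rest (c :: cur) acc (by simp at hlen; omega) hacc
          (by intro h
              rcases List.mem_cons.mp h with h | h
              · exact hc h.symm
              · exact hcur h)

theorem splitOn_no_sep (s : List Char) : ∀ p ∈ PySem.Chars.splitOn s ['/'], '/' ∉ p := by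
  intro p hp
  exact go_no_sep (s.length + 1) s [] [] (by omega) (by simp) (by simp) p
    (by simpa [PySem.Chars.splitOn] using hp)

-- splitOn.go on a slash-free tail produces one final piece
theorem go_no_sep_eq : ∀ (fuel : Nat) (l cur : List Char) (acc : List (List Char)),
    l.length < fuel → '/' ∉ l →
    PySem.Chars.splitOn.go ['/'] fuel l cur acc = acc.reverse ++ [cur.reverse ++ l] := by
  intro fuel
  induction fuel with
  | zero => intro l cur acc h; omega
  | succ n ih =>
    intro l cur acc hlen hl
    match l with
    | [] => simp [PySem.Chars.splitOn.go]
    | c :: rest =>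
      have hc : c ≠ '/' := fun h => hl (h ▸ List.mem_cons_self)
      have hp : List.isPrefixOf ['/'] (c :: rest) = false := by
        simp [List.isPrefixOf, Ne.symm hc]
      simp only [PySem.Chars.splitOn.go, hp, Bool.false_eq_true, if_false]
      rw [ih rest (c :: cur) acc (by simp at hlen; omega)
        (fun h => hl (List.mem_cons_of_mem _ h))]
      simp

theorem splitOn_no_sep_eq (s : List Char) (h : '/' ∉ s) :
    PySem.Chars.splitOn s ['/'] = [s] := by
  unfold PySem.Chars.splitOn
  rw [go_no_sep_eq (s.length + 1) s [] [] (by omega) h]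
  simp

-- weak length bound on splitOn.go pieces
theorem go_len : ∀ (fuel : Nat) (l cur : List Char) (acc : List (List Char)),
    l.length < fuel →
    ∀ p ∈ PySem.Chars.splitOn.go ['/'] fuel l cur acc,
      p ∈ acc ∨ p.length ≤ cur.length + l.length := by
  intro fuel
  induction fuel with
  | zero => intro l cur acc h; omega
  | succ n ih =>
    intro l cur acc hlen
    match l with
    | [] =>
      simp only [PySem.Chars.splitOn.go]
      intro p hpm
      rcases List.mem_cons.mp (List.mem_reverse.mp hpm) with h | h
      · right; subst h; simp
      · left; exact h
    | c :: rest =>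
      by_cases hp : List.isPrefixOf ['/'] (c :: rest) = true
      · simp only [PySem.Chars.splitOn.go, hp, if_pos, List.length_cons, List.drop_succ_cons]
        intro p hpm
        rcases ih rest [] (cur.reverse :: acc) (by simp at hlen; omega) p hpm with h | h
        · rcases List.mem_cons.mp h with h | h
          · right; subst h; simp
          · left; exact h
        · right; simp at h ⊢; omega
      · simp only [PySem.Chars.splitOn.go, hp, Bool.false_eq_true, if_false]
        intro p hpm
        rcases ih rest (c :: cur) acc (by simp at hlen; omega) p hpm with h | h
        · left; exact h
        · right; simp at h ⊢; omega

-- strict bound when the tail still contains a separator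
theorem go_len_strict : ∀ (fuel : Nat) (l cur : List Char) (acc : List (List Char)),
    l.length < fuel → '/' ∈ l →
    ∀ p ∈ PySem.Chars.splitOn.go ['/'] fuel l cur acc,
      p ∈ acc ∨ p.length + 1 ≤ cur.length + l.length := by
  intro fuel
  induction fuel with
  | zero => intro l cur acc h; omega
  | succ n ih =>
    intro l cur acc hlen hsep
    match l with
    | [] => simp at hsep
    | c :: rest =>
      by_cases hp : List.isPrefixOf ['/'] (c :: rest) = true
      · simp only [PySem.Chars.splitOn.go, hp, if_pos, List.length_cons, List.drop_succ_cons]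
        intro p hpm
        by_cases hsr : '/' ∈ rest
        · rcases ih rest [] (cur.reverse :: acc) (by simp at hlen; omega) hsr p hpm with h | h
          · rcases List.mem_cons.mp h with h | h
            · right; subst h; simp
            · left; exact h
          · right; simp at h ⊢; omega
        · rcases go_len n rest [] (cur.reverse :: acc) (by simp at hlen; omega) p hpm with h | h
          · rcases List.mem_cons.mp h with h | h
            · right; subst h; simp
            · left; exact h
          · right; simp at h ⊢; omega
      · have hc : c ≠ '/' := by
          intro h; subst h; simp [List.isPrefixOf] at hp
        have hsr : '/' ∈ rest := by
          rcases List.mem_cons.mp hsep with h | h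
          · exact absurd h.symm hc
          · exact h
        simp only [PySem.Chars.splitOn.go, hp, Bool.false_eq_true, if_false]
        intro p hpm
        rcases ih rest (c :: cur) acc (by simp at hlen; omega) hsr p hpm with h | h
        · left; exact h
        · right; simp at h ⊢; omega

theorem splitOn_len_strict (s : List Char) (hs : '/' ∈ s) :
    ∀ p ∈ PySem.Chars.splitOn s ['/'], p.length < s.length := by
  intro p hp
  have := go_len_strict (s.length + 1) s [] [] (by omega) hs p
    (by simpa [PySem.Chars.splitOn] using hp)
  rcases this with h | h
  · simp at h
  · simpa using h

-- the core equivalence: A's fueled recursion computes B's flat truncate-and-join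
theorem core_eq : ∀ (fuel : Nat) (cs : List Char), cs.length < fuel →
    compactACore fuel cs =
      PySem.Chars.join ['/']
        (((PySem.Chars.splitOn cs ['/']).filter (fun c => !c.isEmpty)).map
          (fun chunk => PySem.Chars.slice chunk none (some 12))) := by
  intro fuel
  induction fuel with
  | zero => intro cs h; omega
  | succ f ih =>
    intro cs hlen
    have hslice : ∀ c : List Char, c.length ≤ 12 →
        PySem.List.slice c none (some 12) = c := by
      intro c hc
      rw [PySem.List.slice_to]
      · exact List.take_of_length_le (by simpa using hc)
      · norm_num
    rcases ctxAlias_getD cs with hal | ⟨hval, hlen12, hnos, hne⟩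
    · -- not an alias key
      simp only [compactACore, hal, ne_eq, not_true_eq_false, if_false]
      by_cases hin : PySem.Chars.isIn ['/'] cs = true
      · have hmem : '/' ∈ cs := by
          rw [PySem.Chars.isIn_iff_infix] at hin
          exact (List.singleton_infix_iff '/' cs).mp hin
        simp only [hin, if_pos]
        congr 1
        apply List.map_congr_left
        intro c hc
        have hcmem := List.mem_of_mem_filter hc
        have hclen : c.length < cs.length := splitOn_len_strict cs hmem c hcmem
        have hcnos : '/' ∉ c := splitOn_no_sep cs c hcmem
        rw [ih c (by omega), splitOn_no_sep_eq c hcnos]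
        have hcne : ¬ c.isEmpty := by
          have := List.mem_filter.mp hc
          simpa using this.2
        simp [List.filter, hcne]
      · simp only [hin]
        have hnos : '/' ∉ cs := by
          intro h
          apply hin
          rw [PySem.Chars.isIn_iff_infix]
          exact (List.singleton_infix_iff '/' cs).mpr h
        rw [splitOn_no_sep_eq cs hnos]
        by_cases hce : cs = []
        · subst hce; simp
        · have hf : List.filter (fun c => !c.isEmpty) [cs] = [cs] := by simp [hce]
          rw [hf]
          simp only [if_neg (by simp : ¬ (false = true)), List.map_cons, List.map_nil,
            PySem.Chars.join_singleton]
          by_cases h12 : cs.length ≤ 12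
          · simp only [h12, if_pos, PySem.Chars.slice_eq_listSlice]
            exact (hslice cs h12).symm
          · simp [h12]
    · -- cs is an alias key: the lookup returns cs itself; so does B's truncation
      simp only [compactACore, hval, ne_eq, hne, not_false_eq_true, if_pos]
      rw [splitOn_no_sep_eq cs hnos]
      have hf : List.filter (fun c => !c.isEmpty) [cs] = [cs] := by simp [hne]
      rw [hf]
      simp only [List.map_cons, List.map_nil, PySem.Chars.join_singleton,
        PySem.Chars.slice_eq_listSlice]
      exact (hslice cs hlen12).symm

-- ===== VERDICT (by name: the statement is the Claim_ definition above) =====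
theorem compact_ctx_part_spec : Claim_equal_compact_ctx_part := by
  intro part _
  unfold Spec_compact_ctx_part compact_ctx_part compact_ctx_part_alt
  rw [core_eq (part.toList.length + 1) part.toList (by omega)]
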